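-- pv_equiv track=rewrite | github.com/kolt07/pazuzu | business/services/llm_service.py | _extract_json_from_intent_response
-- ===== SOURCE A (Python) =====
-- def _extract_json_from_intent_response(text: str) -> str:
--     """Витягує JSON з відповіді (аналог _extract_json_from_response у провайдерів)."""
--     text = text.strip()
--     if text.startswith("```"):
--         lines = text.split("\n")
--         json_lines = []
--         in_json = False
--         for line in lines:
--             if line.strip().startswith("```"):
--                 if not in_json:
--                     in_json = True
--                 else:
--                     break
--                 continue
--             if in_json:
--                 json_lines.append(line)
--         return "\n".join(json_lines)
--     if "{" in text:
--         start = text.find("{")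
--         end = text.rfind("}")
--         if start != -1 and end != -1 and end > start:
--             return text[start : end + 1]
--     return text
-- ===== SOURCE B (Python) =====
-- def _extract_json_from_intent_response(text: str) -> str:
--     text = text.strip()
--     if text.startswith("```"):
--         lines = text.split("\n")
--         fence_idx = [i for i, line in enumerate(lines) if line.strip().startswith("```")]
--         start = fence_idx[0]
--         end = fence_idx[1] if len(fence_idx) > 1 else len(lines)
--         return "\n".join(lines[start + 1 : end])
--     if "{" in text:
--         start = text.find("{")
--         end = text.rfind("}")
--         if start != -1 and end != -1 and end > start:
--             return text[start : end + 1]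
--     return text
-- ===== Notes on version B (the rewrite author's own statement) =====
-- stated objective: alternative
-- what changed: The fence branch's stateful for-loop (in_json flag, accumulator, break) is replaced by computing the list of fence-line indices once with a comprehension and joining a single slice of the lines between the first fence and the second fence (or the end); the brace branch is unchanged.
import Mathlib
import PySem

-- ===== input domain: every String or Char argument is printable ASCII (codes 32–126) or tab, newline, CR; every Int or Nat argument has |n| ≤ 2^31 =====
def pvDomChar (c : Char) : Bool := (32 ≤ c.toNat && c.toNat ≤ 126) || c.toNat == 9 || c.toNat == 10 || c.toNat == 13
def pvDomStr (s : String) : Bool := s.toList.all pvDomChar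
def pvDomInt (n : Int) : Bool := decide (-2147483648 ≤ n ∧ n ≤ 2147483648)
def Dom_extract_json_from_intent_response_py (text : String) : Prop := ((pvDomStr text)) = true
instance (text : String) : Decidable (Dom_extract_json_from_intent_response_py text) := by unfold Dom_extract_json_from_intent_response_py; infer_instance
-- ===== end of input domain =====

-- B replaces A's stateful fence-scanning loop (in_json flag + break) by computing the list of
-- fence-line indices once and joining one slice between the first two fences; objective: alternative.

-- ===== PORT A =====
-- line.strip().startswith("```")  (used by both ports)
def pvFence (l : String) : Bool := PySem.Str.startswith (PySem.Str.strip l) "```"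

-- the trailing '{'...'}' extraction + fallback; this part of the Python source is
-- character-for-character identical in A and in B, so both ports call this one helper
def pvBraceTail (t : String) : String :=
  if PySem.Str.isIn "{" t then
    let s := PySem.Str.find t "{"
    let e := PySem.Str.rfind t "}"
    if s ≠ -1 ∧ e ≠ -1 ∧ s < e then PySem.Str.slice t (some s) (some (e + 1)) else t
  else t

-- A's for-loop over lines with state (in_json, json_lines); 'break' = return acc
def pvALoop (ls : List String) (inj : Bool) (acc : List String) : List String :=
  match ls with
  | [] => acc
  | l :: rest =>
    if pvFence l then
      if !inj then pvALoop rest true acc else acc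
    else if inj then pvALoop rest inj (acc ++ [l])
    else pvALoop rest inj acc

def pvAFence (lines : List String) : String := PySem.Str.join "\n" (pvALoop lines false [])

def extract_json_from_intent_response_py (text : String) : String :=
  let t := PySem.Str.strip text
  if PySem.Str.startswith t "```" then pvAFence ((PySem.Str.split? t "\n").getD [])   -- sep "\n" ≠ "", split? is always `some`
  else pvBraceTail t

-- ===== PORT B =====
-- fence_idx = [i for i, line in enumerate(lines) if line.strip().startswith("```")]
def pvFenceIdx (lines : List String) : List Int :=
  ((PySem.List.enumerate lines).filter (fun p => pvFence p.2)).map Prod.fst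

-- start = fence_idx[0]; end = fence_idx[1] if len(fence_idx) > 1 else len(lines); join(lines[start+1:end])
def pvBFence (lines : List String) : String :=
  match pvFenceIdx lines with
  | [] => ""   -- unreachable from the Python: when text starts with "```", line 0 is itself a fence
  | s :: restIdx =>
    let e : Int := match restIdx with | [] => (lines.length : Int) | e' :: _ => e'
    PySem.Str.join "\n" (PySem.List.slice lines (some (s + 1)) (some e))

def extract_json_from_intent_response_py_alt (text : String) : String :=
  let t := PySem.Str.strip text
  if PySem.Str.startswith t "```" then pvBFence ((PySem.Str.split? t "\n").getD [])
  else pvBraceTail t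

-- ===== PRECONDITION & SPEC =====
def Spec_extract_json_from_intent_response_py (text : String) (out : String) : Prop := out = extract_json_from_intent_response_py_alt text
instance (text : String) (out : String) : Decidable (Spec_extract_json_from_intent_response_py text out) := by unfold Spec_extract_json_from_intent_response_py; infer_instance

-- ===== CLAIM (what is proved, stated in full; the proofs are below) =====
def Claim_equal_extract_json_from_intent_response_py : Prop := ∀ (text : String), Dom_extract_json_from_intent_response_py text → Spec_extract_json_from_intent_response_py text (extract_json_from_intent_response_py text)

-- ===== LEMMAS AND PROOFS =====

lemma enum_shift {α : Type} (ls : List α) (k : Int) :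
    PySem.List.enumerate ls k = (PySem.List.enumerate ls 0).map (fun p => (p.1 + k, p.2)) := by
  induction ls generalizing k with
  | nil => simp [PySem.List.enumerate]
  | cons l ls ih =>
    rw [show ∀ k : Int, PySem.List.enumerate (l :: ls) k = (k, l) :: PySem.List.enumerate ls (k+1) from fun k => by simp [PySem.List.enumerate]]
    rw [show ∀ k : Int, PySem.List.enumerate (l :: ls) k = (k, l) :: PySem.List.enumerate ls (k+1) from fun k => by simp [PySem.List.enumerate]]
    rw [ih (k+1)]
    simp only [zero_add]
    rw [ih 1]
    simp only [List.map_cons, List.map_map, zero_add]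
    congr 1
    refine List.map_congr_left fun p _ => ?_
    simp only [Function.comp_apply, Prod.mk.injEq]
    exact ⟨by omega, trivial⟩

lemma pvFenceIdx_cons (l : String) (ls : List String) :
    pvFenceIdx (l :: ls)
      = if pvFence l then 0 :: (pvFenceIdx ls).map (· + 1) else (pvFenceIdx ls).map (· + 1) := by
  have key : ((PySem.List.enumerate ls 1).filter (fun p => pvFence p.2)).map Prod.fst
      = (pvFenceIdx ls).map (· + 1) := by
    rw [enum_shift ls 1, List.filter_map, List.map_map, pvFenceIdx, List.map_map]
    rfl
  conv_lhs => rw [pvFenceIdx]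
  rw [show PySem.List.enumerate (l :: ls) 0 = (0, l) :: PySem.List.enumerate ls 1 from by simp [PySem.List.enumerate]]
  by_cases h : pvFence l = true <;> simp [h, key]

lemma pvFenceIdx_nonneg (ls : List String) : ∀ j ∈ pvFenceIdx ls, 0 ≤ j := by
  induction ls with
  | nil => simp [pvFenceIdx, PySem.List.enumerate]
  | cons l ls ih =>
    intro j hj
    rw [pvFenceIdx_cons] at hj
    by_cases h : pvFence l = true <;> simp [h] at hj
    · rcases hj with h0 | ⟨x, hx, hx1⟩
      · omega
      · have := ih x hx; omega
    · rcases hj with ⟨x, hx, hx1⟩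
      have := ih x hx; omega

lemma pvALoop_true (ls : List String) (acc : List String) :
    pvALoop ls true acc = acc ++ ls.takeWhile (fun l => !pvFence l) := by
  induction ls generalizing acc with
  | nil => simp [pvALoop]
  | cons l ls ih =>
    by_cases h : pvFence l = true <;> simp [pvALoop, h, ih]

lemma takeWhile_eq_fidx (ls : List String) :
    ls.takeWhile (fun l => !pvFence l)
      = ls.take (match pvFenceIdx ls with | [] => ls.length | j :: _ => j.toNat) := by
  induction ls with
  | nil => simp
  | cons l ls ih =>
    rw [pvFenceIdx_cons]
    by_cases h : pvFence l = true
    · simp [h]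
    · simp only [h, Bool.not_false, List.takeWhile_cons]
      cases hF : pvFenceIdx ls with
      | nil =>
        rw [hF] at ih
        simp only [List.map_nil] at ih ⊢
        simp [ih]
      | cons j tl =>
        have hj : 0 ≤ j := pvFenceIdx_nonneg ls j (by simp [hF])
        rw [hF] at ih
        have h2 : (j + 1).toNat = j.toNat + 1 := by omega
        simp [h2, ih]

lemma slice_cons_shift (l : String) (ls : List String) (a b : Int) (ha : 0 ≤ a) (hb : 0 ≤ b) :
    PySem.List.slice (l :: ls) (some (a + 1)) (some (b + 1)) = PySem.List.slice ls (some a) (some b) := by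
  rw [PySem.List.slice_toNat _ (by omega) (by omega), PySem.List.slice_toNat _ ha hb]
  have h2 : (a + 1).toNat = a.toNat + 1 := by omega
  have h3 : (b + 1).toNat = b.toNat + 1 := by omega
  rw [h2, h3, List.drop_succ_cons]
  congr 1
  omega

lemma fence_branch (ls : List String) :
    PySem.Str.join "\n" (pvALoop ls false []) =
      (match pvFenceIdx ls with
       | [] => ""
       | s :: restIdx =>
         PySem.Str.join "\n" (PySem.List.slice ls (some (s + 1))
           (some (match restIdx with | [] => (ls.length : Int) | e' :: _ => e'))) : String) := by
  induction ls with
  | nil => simp [pvALoop, pvFenceIdx, PySem.List.enumerate, PySem.Str.join]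
  | cons l ls ih =>
    rw [pvFenceIdx_cons]
    by_cases h : pvFence l = true
    · simp only [h, if_true]
      have hA : pvALoop (l :: ls) false [] = ls.takeWhile (fun l => !pvFence l) := by
        simp [pvALoop, h, pvALoop_true]
      rw [hA, takeWhile_eq_fidx]
      cases hF : pvFenceIdx ls with
      | nil =>
        have h1 : PySem.List.slice (l :: ls) (some (1:Int)) (some ((ls.length : Int) + 1))
            = ls := by
          have := PySem.List.slice_natCast (l :: ls) 1 (ls.length + 1)
          push_cast at this
          simpa using this
        simp [h1]
      | cons j tl =>
        have hj : 0 ≤ j := pvFenceIdx_nonneg ls j (by simp [hF])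
        have h1 : PySem.List.slice (l :: ls) (some (1:Int)) (some (j + 1)) = ls.take j.toNat := by
          rw [PySem.List.slice_toNat _ (by omega) (by omega)]
          have h2 : (j + 1).toNat = j.toNat + 1 := by omega
          simp [h2]
        simp [h1]
    · simp only [h, Bool.false_eq_true, if_false]
      have hA : pvALoop (l :: ls) false [] = pvALoop ls false [] := by
        simp [pvALoop, h]
      rw [hA, ih]
      cases hF : pvFenceIdx ls with
      | nil => simp
      | cons s tl =>
        have hs : 0 ≤ s := pvFenceIdx_nonneg ls s (by simp [hF])
        simp only [List.map_cons]
        cases tl with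
        | nil =>
          simp only [List.map_nil, List.length_cons, Nat.cast_add, Nat.cast_one]
          rw [slice_cons_shift l ls (s + 1) (ls.length : Int) (by omega) (by omega)]
        | cons e tl' =>
          have he : 0 ≤ e := pvFenceIdx_nonneg ls e (by simp [hF])
          simp only [List.map_cons]
          rw [slice_cons_shift l ls (s + 1) e (by omega) he]

lemma fence_eq (lines : List String) : pvAFence lines = pvBFence lines := by
  unfold pvAFence pvBFence
  exact fence_branch lines

-- ===== VERDICT (by name: the statement is the Claim_ definition above) =====
theorem extract_json_from_intent_response_py_spec : Claim_equal_extract_json_from_intent_response_py := by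
  intro text _
  unfold Spec_extract_json_from_intent_response_py
  unfold extract_json_from_intent_response_py extract_json_from_intent_response_py_alt
  by_cases h : PySem.Str.startswith (PySem.Str.strip text) "```" = true
  · simp only [h, if_true, fence_eq]
  · simp only [h, Bool.false_eq_true, if_false]
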